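-- pv_equiv track=rewrite | github.com/daniel-rneto/Introducao_Ciencia_Computacao_com_Python_Parte_1 | teste.py | ePrimo
-- ===== SOURCE A (Python) =====
-- def ePrimo(x):
--     maior_primo = 0
--     contador = 0
--     while (contador < x):
--
--         if (contador % 2 != 0):
--             maior_primo = contador
--             #print (contador, " Nâo é Primo")
--         contador = contador + 1
--
--     return maior_primo
-- ===== SOURCE B (Python) =====
-- def ePrimo(x):
--     # Closed form: largest odd integer below x (0 when x <= 1).
--     if x <= 1:
--         return 0
--     return x - 2 if x % 2 != 0 else x - 1
-- ===== Notes on version B (the rewrite author's own statement) =====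
-- stated objective: faster
-- what changed: Replaced the O(x) counting loop by an O(1) closed form: 0 if x<=1, else x-2 when x is odd, x-1 when even.
import Mathlib
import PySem

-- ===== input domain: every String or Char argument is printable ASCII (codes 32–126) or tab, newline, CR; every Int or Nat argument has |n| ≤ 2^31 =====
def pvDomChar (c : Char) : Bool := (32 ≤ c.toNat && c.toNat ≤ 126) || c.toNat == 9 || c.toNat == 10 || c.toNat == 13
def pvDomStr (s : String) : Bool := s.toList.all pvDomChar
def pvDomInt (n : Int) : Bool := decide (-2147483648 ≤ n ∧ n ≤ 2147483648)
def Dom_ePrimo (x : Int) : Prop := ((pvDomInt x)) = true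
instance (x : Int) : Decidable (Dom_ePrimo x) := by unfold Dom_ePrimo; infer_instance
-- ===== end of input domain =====

-- B replaces A's O(x) counting loop by an O(1) closed form (largest odd below x, 0 when x ≤ 1).

-- ===== PORT A =====
-- the while-loop runs contador = 0,1,…,x-1, keeping the last odd contador in maior_primo
def ePrimo (x : Int) : Int :=
  (PySem.List.pyRange 0 x 1).foldl
    (fun maior_primo contador =>
      if PySem.Int.mod contador 2 ≠ 0 then contador else maior_primo) 0

-- ===== PORT B =====
def ePrimo_alt (x : Int) : Int :=
  if x ≤ 1 then 0
  else if PySem.Int.mod x 2 ≠ 0 then x - 2 else x - 1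

-- ===== PRECONDITION & SPEC =====
def Spec_ePrimo (x : Int) (out : Int) : Prop := out = ePrimo_alt x
instance (x : Int) (out : Int) : Decidable (Spec_ePrimo x out) := by unfold Spec_ePrimo; infer_instance

-- ===== CLAIM (what is proved, stated in full; the proofs are below) =====
def Claim_equal_ePrimo : Prop := ∀ (x : Int), Dom_ePrimo x → Spec_ePrimo x (ePrimo x)

-- ===== LEMMAS AND PROOFS =====

lemma pymod2 (a : Int) : PySem.Int.mod a 2 = a % 2 := by
  simp [PySem.Int.mod, Int.fmod_eq_emod]

lemma ePrimo_alt_eq (x : Int) :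
    ePrimo_alt x = if x ≤ 1 then 0 else if x % 2 ≠ 0 then x - 2 else x - 1 := by
  unfold ePrimo_alt; rw [pymod2]

lemma ePrimo_nat (n : Nat) : ePrimo (n : Int) = ePrimo_alt (n : Int) := by
  induction n with
  | zero => decide
  | succ m ih =>
    unfold ePrimo at *
    rw [show ((m + 1 : Nat) : Int) = (m : Int) + 1 by push_cast; ring,
        PySem.List.pyRange_one_succ_right (by positivity), List.foldl_append]
    simp only [List.foldl, pymod2]
    simp only [pymod2] at ih
    have hm : 0 ≤ (m : Int) := by positivity
    by_cases hodd : (m : Int) % 2 = 0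
    · rw [if_neg (by simpa using hodd), ih, ePrimo_alt_eq, ePrimo_alt_eq]
      by_cases h1 : (m : Int) + 1 ≤ 1
      · rw [if_pos h1, if_pos (by omega)]
      · rw [if_neg h1]
        have : ((m : Int) + 1) % 2 ≠ 0 := by omega
        rw [if_pos this]
        by_cases h2 : (m : Int) ≤ 1
        · -- then m = 0, contradiction with h1 since m+1 ≤ 1 fails only if m ≥ 1; m even ⇒ impossible
          exfalso; omega
        · rw [if_neg h2, if_neg (by omega)]; ring
    · rw [if_pos (by simpa using hodd), ePrimo_alt_eq]
      rw [if_neg (by omega), if_neg (by omega)]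
      ring

-- ===== VERDICT (by name: the statement is the Claim_ definition above) =====
theorem ePrimo_spec : Claim_equal_ePrimo := by
  intro x _
  unfold Spec_ePrimo
  by_cases h : x ≤ 0
  · unfold ePrimo
    rw [PySem.List.pyRange_one_eq_nil h, ePrimo_alt_eq, if_pos (by omega)]
    rfl
  · have hx : x = ((x.toNat : Nat) : Int) := by omega
    rw [hx]; exact ePrimo_nat x.toNat
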